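-- pv_equiv track=rewrite | github.com/aadithmoorthy/cs155_miniproject_3 | sonnetTools.py | _findSyllablesLine
-- ===== SOURCE A (Python) =====
-- def _findSyllablesLine(lineOptions, remainingCount=10):
--     # Work recursively to find the correct syllable counts.
--     # This works right to left across the line.
--     # Base Case: lineOptions is just a single word
--     if len(lineOptions)==1:
--         wordOptions = lineOptions[0]
--         # Check if there is a syllable count which
--         # matches the remaining syllables
--         if all([counts!=remainingCount for counts in wordOptions]):
--             # If no option matches the remaining
--             # count, return None as there is
--             # no valid choice
--             return None
--         else:
--             # There is a choice which exactly
--             # matches remainingCount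
--             return [[remainingCount]]
--     # Recursive Step: lineOptions is several words
--     nextWordOptions = lineOptions[-1]
--     remainingLine = lineOptions[:-1]
--     for possibleCount in nextWordOptions:
--         # For each possible syllable count for the word,
--         # see if the remaining sentence can be constructed
--         r = remainingCount - possibleCount
--         lineCounts = _findSyllablesLine(remainingLine, r)
--         if lineCounts != None:
--             # A valid combination of syllable counts was
--             # found. Append the current syllable choice
--             # and return
--             lineCounts.append([possibleCount])
--             return lineCounts
--     # Otherwise, no valid combination of counts
--     # was found for the remaining fragment. Thus,
--     # there is no valid choice.
--     return None
-- ===== SOURCE B (Python) =====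
-- def _findSyllablesLine(lineOptions, remainingCount=10):
--     # DP: possible[i] = set of syllable totals achievable by words 0..i-1,
--     # then reconstruct the choices right to left, preferring earlier options.
--     possible = [{0}]
--     for opts in lineOptions:
--         prev = possible[-1]
--         possible.append({s + c for s in prev for c in opts})
--     if remainingCount not in possible[-1]:
--         return None
--     pairs = list(zip(lineOptions, possible))
--     rem = remainingCount
--     result = []
--     for opts, reach in reversed(pairs[1:]):
--         for c in opts:
--             if rem - c in reach:
--                 result.insert(0, [c])
--                 rem -= c
--                 break
--     result.insert(0, [rem])
--     return result
-- ===== Notes on version B (the rewrite author's own statement) =====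
-- stated objective: alternative
-- what changed: Replaced A's right-to-left backtracking recursion with a left-to-right DP that builds, per prefix, the set of achievable syllable totals, followed by one right-to-left reconstruction pass picking the first fitting option per word.
import Mathlib
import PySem

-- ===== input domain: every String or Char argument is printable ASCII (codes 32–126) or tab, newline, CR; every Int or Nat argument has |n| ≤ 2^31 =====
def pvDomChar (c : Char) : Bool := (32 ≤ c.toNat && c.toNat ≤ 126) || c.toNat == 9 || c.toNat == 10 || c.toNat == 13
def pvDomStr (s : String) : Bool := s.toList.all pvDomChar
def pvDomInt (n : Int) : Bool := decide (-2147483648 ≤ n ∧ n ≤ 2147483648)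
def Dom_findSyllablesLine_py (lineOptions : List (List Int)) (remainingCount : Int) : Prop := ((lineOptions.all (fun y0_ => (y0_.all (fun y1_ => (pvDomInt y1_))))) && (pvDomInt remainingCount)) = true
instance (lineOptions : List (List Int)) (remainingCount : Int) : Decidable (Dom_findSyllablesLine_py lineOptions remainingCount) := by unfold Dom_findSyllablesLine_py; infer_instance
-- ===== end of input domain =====

-- B replaces A's right-to-left backtracking search by a left-to-right DP of
-- reachable-sum sets followed by a single right-to-left reconstruction pass (alternative algorithm).

-- ===== PORT A =====
-- Literal transliteration of the Python recursion: base case len == 1, otherwise loop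
-- over the last word's options and recurse on the line without its last word.
def findSyllablesLine_py (lineOptions : List (List Int)) (remainingCount : Int) : Option (List (List Int)) :=
  if lineOptions.length = 1 then
    if (lineOptions.headD []).all (fun counts => counts != remainingCount) then none
    else some [[remainingCount]]
  else
    match lineOptions with
    | [] => none  -- Python raises IndexError here (lineOptions[-1]); excluded by Pre_
    | x :: xs =>
      ((x :: xs).getLastD []).findSome? (fun possibleCount =>
        (findSyllablesLine_py (x :: xs).dropLast (remainingCount - possibleCount)).map
          (fun lineCounts => lineCounts ++ [[possibleCount]]))
termination_by lineOptions.length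
decreasing_by simp

-- ===== PORT B =====
def pvS0 : PySem.Set Int := PySem.Set.ofList [0]

-- one step of `possible.append({s + c for s in possible[-1] for c in opts})`
def pvStep (acc : List (PySem.Set Int)) (opts : List Int) : List (PySem.Set Int) :=
  acc ++ [PySem.Set.ofList ((acc.getLastD pvS0).flatMap (fun s => opts.map (fun c => s + c)))]

def pvPossible (lineOptions : List (List Int)) : List (PySem.Set Int) :=
  lineOptions.foldl pvStep [pvS0]

-- the reconstruction loop `for opts, reach in reversed(pairs[1:]): …` with state (rem, result)
def pvBLoop : List (List Int × PySem.Set Int) → Int → List (List Int) → Int × List (List Int)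
  | [], rem, result => (rem, result)
  | (opts, reach) :: rest, rem, result =>
    match opts.find? (fun c => PySem.Set.contains reach (rem - c)) with
    | some c => pvBLoop rest (rem - c) ([c] :: result)
    | none => pvBLoop rest rem result

def findSyllablesLine_py_alt (lineOptions : List (List Int)) (remainingCount : Int) : Option (List (List Int)) :=
  let possible := pvPossible lineOptions
  if PySem.Set.contains (possible.getLastD pvS0) remainingCount then
    let pairs := lineOptions.zip possible
    let pr := pvBLoop (pairs.drop 1).reverse remainingCount []
    some ([pr.1] :: pr.2)
  else none

-- ===== PRECONDITION & SPEC =====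
-- Pre_ excludes only the empty line, on which Python A raises IndexError (lineOptions[-1]).
def Pre_findSyllablesLine_py (lineOptions : List (List Int)) (remainingCount : Int) : Prop :=
  lineOptions ≠ []
instance (lineOptions : List (List Int)) (remainingCount : Int) : Decidable (Pre_findSyllablesLine_py lineOptions remainingCount) := by unfold Pre_findSyllablesLine_py; infer_instance
def pvWitness_findSyllablesLine_py : List (List Int) × Int := ([[1, 2], [2]], 3)

def Spec_findSyllablesLine_py (lineOptions : List (List Int)) (remainingCount : Int) (out : Option (List (List Int))) : Prop := out = findSyllablesLine_py_alt lineOptions remainingCount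
instance (lineOptions : List (List Int)) (remainingCount : Int) (out : Option (List (List Int))) : Decidable (Spec_findSyllablesLine_py lineOptions remainingCount out) := by unfold Spec_findSyllablesLine_py; infer_instance

-- ===== CLAIM (what is proved, stated in full; the proofs are below) =====
def Claim_equal_findSyllablesLine_py : Prop := ∀ (lineOptions : List (List Int)) (remainingCount : Int), Dom_findSyllablesLine_py lineOptions remainingCount → Pre_findSyllablesLine_py lineOptions remainingCount → Spec_findSyllablesLine_py lineOptions remainingCount (findSyllablesLine_py lineOptions remainingCount)

-- ===== LEMMAS AND PROOFS =====

def pvLastSet (l : List (List Int)) : PySem.Set Int := (pvPossible l).getLastD pvS0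

theorem pvLastSet_nil : pvLastSet [] = [0] := rfl

theorem pvPossible_concat (l : List (List Int)) (w : List Int) :
    pvPossible (l ++ [w]) = pvStep (pvPossible l) w := by
  simp [pvPossible, List.foldl_append]

theorem pvLastSet_concat (l : List (List Int)) (w : List Int) :
    pvLastSet (l ++ [w])
      = PySem.Set.ofList ((pvLastSet l).flatMap (fun s => w.map (fun c => s + c))) := by
  simp [pvLastSet, pvPossible_concat, pvStep]

theorem pvMem_lastSet_concat (l : List (List Int)) (w : List Int) (r : Int) :
    r ∈ pvLastSet (l ++ [w]) ↔ ∃ c ∈ w, (r - c) ∈ pvLastSet l := by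
  rw [pvLastSet_concat]
  simp only [PySem.Set.mem_ofList, List.mem_flatMap, List.mem_map]
  constructor
  · rintro ⟨s, hs, c, hc, rfl⟩
    exact ⟨c, hc, by simpa using hs⟩
  · rintro ⟨c, hc, hs⟩
    exact ⟨r - c, hs, c, hc, by ring⟩

theorem pvMem_lastSet_single (w : List Int) (r : Int) :
    r ∈ pvLastSet [w] ↔ r ∈ w := by
  have h := pvMem_lastSet_concat [] w r
  simp only [List.nil_append] at h
  rw [h]
  constructor
  · rintro ⟨c, hc, hmem⟩
    rw [pvLastSet_nil] at hmem
    simp at hmem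
    have : r = c := by omega
    rwa [this]
  · intro hr
    exact ⟨r, hr, by rw [pvLastSet_nil]; simp⟩

theorem pvPossible_length (l : List (List Int)) : (pvPossible l).length = l.length + 1 := by
  induction l using List.reverseRecOn with
  | nil => rfl
  | append_singleton l w ih => simp [pvPossible_concat, pvStep, ih]

theorem pvA_single (w : List Int) (r : Int) :
    findSyllablesLine_py [w] r
      = if w.all (fun c => c != r) then none else some [[r]] := by
  rw [findSyllablesLine_py.eq_def]
  simp

theorem pvA_concat (init : List (List Int)) (hne : init ≠ []) (w : List Int) (r : Int) :
    findSyllablesLine_py (init ++ [w]) r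
      = w.findSome? (fun c =>
          (findSyllablesLine_py init (r - c)).map (fun lc => lc ++ [[c]])) := by
  rw [findSyllablesLine_py.eq_def]
  have hlen : (init ++ [w]).length ≠ 1 := by
    cases init with
    | nil => exact absurd rfl hne
    | cons a as => simp
  rw [if_neg hlen]
  cases init with
  | nil => exact absurd rfl hne
  | cons a as =>
    have e1 : (a :: (as ++ [w])).getLast?.getD [] = w := by
      have : a :: (as ++ [w]) = (a :: as) ++ [w] := rfl
      rw [this, List.getLast?_concat]
      rfl
    have e2 : (a :: (as ++ [w])).dropLast = a :: as := by
      have : a :: (as ++ [w]) = (a :: as) ++ [w] := rfl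
      rw [this, List.dropLast_concat]
    show List.findSome?
        (fun possibleCount =>
          Option.map (fun lineCounts => lineCounts ++ [[possibleCount]])
            (findSyllablesLine_py (a :: (as ++ [w])).dropLast (r - possibleCount)))
        ((a :: (as ++ [w])).getLast?.getD []) = _
    simp only [e1, e2]

theorem pvA_none_iff (l : List (List Int)) (w : List Int) (r : Int) :
    findSyllablesLine_py (l ++ [w]) r = none ↔ r ∉ pvLastSet (l ++ [w]) := by
  induction l using List.reverseRecOn generalizing w r with
  | nil =>
    simp only [List.nil_append]
    rw [pvA_single]
    rw [show (r ∉ pvLastSet [w]) ↔ r ∉ w from not_congr (pvMem_lastSet_single w r)]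
    split_ifs with hall
    · simp only [List.all_eq_true, bne_iff_ne, ne_eq] at hall
      simp only [true_iff]
      intro hr; exact hall r hr rfl
    · simp only [List.all_eq_true, bne_iff_ne, ne_eq, not_forall] at hall
      obtain ⟨c, hc, hcr⟩ := hall
      have hceq : c = r := by tauto
      subst hceq
      simp only [false_iff, not_not]
      exact hc
  | append_singleton l a ih =>
    rw [pvA_concat (l ++ [a]) (by simp) w r, pvMem_lastSet_concat]
    rw [List.findSome?_eq_none_iff]
    constructor
    · intro h
      rintro ⟨c, hc, hmem⟩
      have hc' := h c hc
      rw [Option.map_eq_none_iff, ih] at hc'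
      exact hc' hmem
    · intro h c hc
      rw [Option.map_eq_none_iff, ih]
      intro hmem
      exact h ⟨c, hc, hmem⟩

theorem pvFindSome?_eq_bind_find? {α β : Type} (f : α → Option β) (p : α → Bool)
    (h : ∀ c, f c = none ↔ p c = false) (xs : List α) :
    xs.findSome? f = (xs.find? p).bind f := by
  induction xs with
  | nil => rfl
  | cons c rest ih =>
    rw [List.findSome?_cons, List.find?_cons]
    cases hfc : f c with
    | some b =>
      have hp : p c = true := by
        cases hpc : p c with
        | false => rw [(h c).mpr hpc] at hfc; cases hfc
        | true => rfl
      simp [hp, hfc]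
    | none =>
      have hp : p c = false := (h c).mp hfc
      simp [hp, ih]

theorem pvBLoop_acc (ps : List (List Int × PySem.Set Int)) (rem : Int)
    (acc : List (List Int)) :
    pvBLoop ps rem acc = ((pvBLoop ps rem []).1, (pvBLoop ps rem []).2 ++ acc) := by
  induction ps generalizing rem acc with
  | nil => simp [pvBLoop]
  | cons p rest ih =>
    obtain ⟨opts, reach⟩ := p
    cases hf : opts.find? (fun c => PySem.Set.contains reach (rem - c)) with
    | some c =>
      simp only [pvBLoop, hf]
      rw [ih (rem - c) ([c] :: acc), ih (rem - c) [[c]]]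
      simp
    | none =>
      simp only [pvBLoop, hf]
      exact ih rem acc

theorem pvZip_append_right {α β : Type} (xs : List α) (ys : List β) (b : β)
    (h : xs.length ≤ ys.length) : xs.zip (ys ++ [b]) = xs.zip ys := by
  induction xs generalizing ys with
  | nil => simp
  | cons x xs ih =>
    cases ys with
    | nil => simp at h
    | cons y ys => simp_all [List.zip_cons_cons]

theorem pvPairs_concat (init : List (List Int)) (hne : init ≠ []) (w : List Int) :
    (((init ++ [w]).zip (pvPossible (init ++ [w]))).drop 1).reverse
      = (w, pvLastSet init) :: ((init.zip (pvPossible init)).drop 1).reverse := by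
  have hP := pvPossible_length init
  have hPne : pvPossible init ≠ [] := by
    intro h; rw [h] at hP; simp at hP
  have hdl : (pvPossible init).dropLast ++ [pvLastSet init] = pvPossible init := by
    have h := List.dropLast_append_getLast hPne
    rw [pvLastSet, List.getLastD_eq_getLast?, List.getLast?_eq_some_getLast hPne]
    exact h
  have hdllen : (pvPossible init).dropLast.length = init.length := by
    simp [List.length_dropLast, hP]
  have h1 : (init ++ [w]).zip (pvPossible (init ++ [w])) = (init ++ [w]).zip (pvPossible init) := by
    rw [pvPossible_concat, pvStep]
    exact pvZip_append_right _ _ _ (by simp [hP])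
  have h2 : (init ++ [w]).zip (pvPossible init)
      = init.zip ((pvPossible init).dropLast) ++ [(w, pvLastSet init)] := by
    conv_lhs => rw [← hdl]
    exact List.zip_append (by omega)
  have h3 : init.zip (pvPossible init) = init.zip ((pvPossible init).dropLast) := by
    conv_lhs => rw [← hdl]
    exact pvZip_append_right _ _ _ (by omega)
  rw [h1, h2, h3]
  have hzlen : 1 ≤ (init.zip ((pvPossible init).dropLast)).length := by
    rw [List.length_zip, hdllen]
    cases init with
    | nil => exact absurd rfl hne
    | cons a as => simp
  rw [List.drop_append_of_le_length hzlen]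
  simp

theorem pvB_unfold (l : List (List Int)) (r : Int) :
    findSyllablesLine_py_alt l r
      = if PySem.Set.contains (pvLastSet l) r then
          some ([(pvBLoop ((l.zip (pvPossible l)).drop 1).reverse r []).1]
            :: (pvBLoop ((l.zip (pvPossible l)).drop 1).reverse r []).2)
        else none := rfl

theorem pvMain (l : List (List Int)) (w : List Int) (r : Int) :
    findSyllablesLine_py (l ++ [w]) r = findSyllablesLine_py_alt (l ++ [w]) r := by
  induction l using List.reverseRecOn generalizing w r with
  | nil =>
    simp only [List.nil_append]
    rw [pvA_single, pvB_unfold]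
    have hzip : (([w] : List (List Int)).zip (pvPossible [w])).drop 1 = [] := by
      rw [List.drop_eq_nil_iff, List.length_zip]
      simp
    rw [hzip]
    by_cases hr : r ∈ w
    · rw [if_pos (PySem.Set.contains_iff _ _ |>.mpr ((pvMem_lastSet_single w r).mpr hr))]
      have hall : (w.all fun c => c != r) = false := by
        rw [Bool.eq_false_iff]
        simp only [ne_eq, List.all_eq_true, bne_iff_ne, not_forall]
        exact ⟨r, hr, by simp⟩
      rw [hall]
      rfl
    · have hcon : PySem.Set.contains (pvLastSet [w]) r = false := by
        rw [Bool.eq_false_iff]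
        intro hc
        exact hr ((pvMem_lastSet_single w r).mp ((PySem.Set.contains_iff _ _).mp hc))
      rw [hcon]
      rw [if_pos (by simp only [List.all_eq_true, bne_iff_ne, ne_eq]; intro c hc hcr; exact hr (hcr ▸ hc))]
      simp
  | append_singleton l a ih =>
    set init := l ++ [a] with hinit
    have hne : init ≠ [] := by simp [hinit]
    rw [pvA_concat init hne w r, pvB_unfold]
    have hfeq : ∀ c : Int,
        ((findSyllablesLine_py init (r - c)).map (fun lc => lc ++ [[c]]) = none)
          ↔ (PySem.Set.contains (pvLastSet init) (r - c) = false) := by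
      intro c
      rw [Option.map_eq_none_iff, hinit, pvA_none_iff]
      rw [← hinit]
      constructor
      · intro h
        rw [Bool.eq_false_iff]
        intro hc
        exact h ((PySem.Set.contains_iff _ _).mp hc)
      · intro h hmem
        rw [Bool.eq_false_iff] at h
        exact h ((PySem.Set.contains_iff _ _).mpr hmem)
    rw [pvFindSome?_eq_bind_find? _ (fun c => PySem.Set.contains (pvLastSet init) (r - c)) hfeq w]
    rw [pvPairs_concat init hne w]
    by_cases hrmem : r ∈ pvLastSet (init ++ [w])
    · rw [if_pos ((PySem.Set.contains_iff _ _).mpr hrmem)]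
      obtain ⟨c0, hc0, hmem0⟩ := (pvMem_lastSet_concat init w r).mp hrmem
      cases hf : w.find? (fun c => PySem.Set.contains (pvLastSet init) (r - c)) with
      | none =>
        exfalso
        have := List.find?_eq_none.mp hf c0 hc0
        exact this ((PySem.Set.contains_iff _ _).mpr hmem0)
      | some cstar =>
        have hpc : PySem.Set.contains (pvLastSet init) (r - cstar) = true := by
          have h := List.find?_some hf
          simpa using h
        have hmemstar : (r - cstar) ∈ pvLastSet init := (PySem.Set.contains_iff _ _).mp hpc
        have hih : findSyllablesLine_py init (r - cstar) = findSyllablesLine_py_alt init (r - cstar) := by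
          rw [hinit]; exact ih a (r - cstar)
        have hB := pvB_unfold init (r - cstar)
        rw [if_pos ((PySem.Set.contains_iff _ _).mpr hmemstar)] at hB
        have hloop : pvBLoop ((w, pvLastSet init) :: ((init.zip (pvPossible init)).drop 1).reverse) r []
            = pvBLoop ((init.zip (pvPossible init)).drop 1).reverse (r - cstar) [[cstar]] := by
          simp only [pvBLoop, hf]
        rw [hloop, pvBLoop_acc _ (r - cstar) [[cstar]]]
        simp [hih, hB]
    · rw [if_neg (by rw [Bool.not_eq_true, Bool.eq_false_iff]; intro hc; exact hrmem ((PySem.Set.contains_iff _ _).mp hc))]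
      have hf : w.find? (fun c => PySem.Set.contains (pvLastSet init) (r - c)) = none := by
        rw [List.find?_eq_none]
        intro c hc hpc
        exact hrmem ((pvMem_lastSet_concat init w r).mpr ⟨c, hc, (PySem.Set.contains_iff _ _).mp hpc⟩)
      rw [hf]
      rfl

-- ===== VERDICT (by name: the statement is the Claim_ definition above) =====
theorem findSyllablesLine_py_spec : Claim_equal_findSyllablesLine_py := by
  intro lineOptions remainingCount _ hpre
  unfold Spec_findSyllablesLine_py
  induction lineOptions using List.reverseRecOn with
  | nil => exact absurd rfl hpre
  | append_singleton l w _ => exact pvMain l w remainingCount
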